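-- pv_equiv track=rewrite | github.com/NREL/ATHENA-bus | utils_old/read_lib.py | partition_route
-- ===== SOURCE A (Python) =====
-- def partition_route(route):
--     I =[]
--     for i in range(len(route)):
--         if route[i] == 'R':
--             I.append(i)
--
--     route_partition ={}
--     for j in range(len(I)-1):
--         route_partition[j] = route[I[j]:I[j+1] + 1]
--
--     return route_partition
-- ===== SOURCE B (Python) =====
-- def partition_route(route):
--     segments = []
--     try:
--         rest = route[route.index('R'):]
--         while True:
--             k = rest.index('R', 1)
--             segments.append(rest[:k + 1])
--             rest = rest[k:]
--     except ValueError: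
--         pass
--     return dict(enumerate(segments))
-- ===== Notes on version B (the rewrite author's own statement) =====
-- stated objective: alternative
-- what changed: B never builds A's table of all R positions nor runs A's pairwise index loop: it iterates on list suffixes, using the built-in list.index search (with start 1) to find the next marker, emits the prefix up to and including it, drops to that marker, and finally numbers the collected segment list with dict(enumerate(...)).
import Mathlib
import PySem

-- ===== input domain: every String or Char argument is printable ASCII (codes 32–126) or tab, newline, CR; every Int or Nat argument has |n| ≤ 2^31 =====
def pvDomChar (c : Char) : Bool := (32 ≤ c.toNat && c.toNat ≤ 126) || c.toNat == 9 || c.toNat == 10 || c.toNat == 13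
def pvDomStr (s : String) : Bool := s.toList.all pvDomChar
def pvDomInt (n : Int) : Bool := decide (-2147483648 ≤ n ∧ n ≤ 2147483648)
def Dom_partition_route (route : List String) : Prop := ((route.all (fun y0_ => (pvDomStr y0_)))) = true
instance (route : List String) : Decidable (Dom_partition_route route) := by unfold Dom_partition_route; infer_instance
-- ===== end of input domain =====

-- B replaces A's two-phase design (index table of all 'R' positions + pairwise slicing loop) by
-- iteration on list suffixes driven by the built-in next-marker search, numbering the collected
-- segments at the end; same output, no speed claim.

-- ===== PORT A =====
-- A's first loop: collect the indices i with route[i] == 'R'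
def partition_route_I (route : List String) : List Int :=
  (PySem.List.pyRange 0 (route.length : Int) 1).foldl
    (fun acc i => if PySem.List.pyGetD route i "" = "R" then acc ++ [i] else acc) []

-- A's second loop: route_partition[j] = route[I[j] : I[j+1] + 1] for j in range(len(I) - 1)
def partition_route (route : List String) : List (Int × List String) :=
  ((PySem.List.pyRange 0 (((partition_route_I route).length : Int) - 1) 1).foldl
    (fun d j => d.insert j (PySem.List.slice route
      (some (PySem.List.pyGetD (partition_route_I route) j 0))
      (some (PySem.List.pyGetD (partition_route_I route) (j + 1) 0 + 1))))
    (PySem.Dict.empty : PySem.Dict Int (List String))).items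

-- ===== PORT B =====
-- B's while-loop on the suffix `rest` (head of rest is the previous marker):
-- k = rest.index('R', 1)  — first "R" at position ≥ 1, i.e. index? of the tail, plus 1 (ValueError = none, ends the loop);
-- emit rest[:k+1], continue with rest[k:].  rest[:k+1] = take (k0+2), rest[k:] = drop (k0+1) with k = k0+1.
def segLoop : List String → List (List String)
  | [] => []
  | x :: xs =>
    match PySem.List.index? xs "R" with
    | some k0 => (x :: xs).take (k0 + 2) :: segLoop ((x :: xs).drop (k0 + 1))
    | none => []
termination_by l => l.length
decreasing_by simp

-- rest = route[route.index('R'):] (ValueError → segments stays []), then the loop; dict(enumerate(segments)).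
def partition_route_alt (route : List String) : List (Int × List String) :=
  let segments : List (List String) :=
    match PySem.List.index? route "R" with
    | some i => segLoop (route.drop i)
    | none => []
  ((PySem.List.enumerate segments 0).foldl
      (fun (d : PySem.Dict Int (List String)) p => d.insert p.1 p.2)
      (PySem.Dict.empty : PySem.Dict Int (List String))).items

-- ===== PRECONDITION & SPEC =====
def Spec_partition_route (route : List String) (out : List (Int × List String)) : Prop := out = partition_route_alt route
instance (route : List String) (out : List (Int × List String)) : Decidable (Spec_partition_route route out) := by unfold Spec_partition_route; infer_instance

-- ===== CLAIM (what is proved, stated in full; the proofs are below) =====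
def Claim_equal_partition_route : Prop := ∀ (route : List String), Dom_partition_route route → Spec_partition_route route (partition_route route)

-- ===== LEMMAS AND PROOFS =====
-- helper (proofs only): the common normal form — keyed overlapping slices from the Int index list
def pvPairs (route : List String) : List Int → Int → List (Int × List String)
  | a :: b :: t, j => (j, PySem.List.slice route (some a) (some (b + 1))) :: pvPairs route (b :: t) (j + 1)
  | _, _ => []

-- the canonical R-index list, as a filter over enumerate
def pvIdx (route : List String) : List Int :=
  ((PySem.List.enumerate route 0).filter (fun q => decide (q.2 = "R"))).map (·.1)

-- ===== A-side =====
theorem pvA_first_loop (route : List String) :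
    partition_route_I route = pvIdx route := by
  unfold partition_route_I
  rw [PySem.List.foldl_append_ite_eq_filter, List.nil_append]
  have h1 : PySem.List.pyRange 0 (route.length : Int) 1
      = (PySem.List.enumerate route 0).map (·.1) := by
    rw [PySem.List.map_fst_enumerate]; norm_num
  rw [h1, List.filter_map]
  unfold pvIdx
  congr 1
  apply List.filter_congr
  intro q hq
  rcases (PySem.List.mem_enumerate_iff _ _ _).mp hq with ⟨k, hk, rfl⟩
  simp [PySem.List.pyGetD_natCast, List.getD_eq_getElem?_getD, hk]

theorem pvPairs_eq_map (route : List String) (L : List Int) :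
    ∀ (j0 : Int),
    (List.range (L.length - 1)).map
      (fun (k : Nat) => ((j0 + (k : Int), PySem.List.slice route (some (L.getD k 0))
          (some (L.getD (k + 1) 0 + 1))) : Int × List String))
      = pvPairs route L j0 := by
  induction L with
  | nil => intro j0; simp [pvPairs]
  | cons a t ih =>
    intro j0
    cases t with
    | nil => simp [pvPairs]
    | cons b u =>
      have hlen : (a :: b :: u).length - 1 = (b :: u).length - 1 + 1 := by simp
      rw [hlen, List.range_succ_eq_map, List.map_cons, List.map_map]
      have htail :
          (List.range ((b :: u).length - 1)).map
            ((fun (k : Nat) => ((j0 + (k : Int), PySem.List.slice route (some ((a :: b :: u).getD k 0))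
              (some ((a :: b :: u).getD (k + 1) 0 + 1))) : Int × List String)) ∘ (· + 1))
          = (List.range ((b :: u).length - 1)).map
            (fun (k : Nat) => ((j0 + 1 + (k : Int), PySem.List.slice route (some ((b :: u).getD k 0))
              (some ((b :: u).getD (k + 1) 0 + 1))) : Int × List String)) := by
        apply List.map_congr_left
        intro k _
        simp only [Function.comp_apply, List.getD_cons_succ]
        push_cast
        ring_nf
      rw [htail, ih (j0 + 1)]
      simp [pvPairs]

theorem pvA_eq (route : List String) :
    partition_route route = pvPairs route (pvIdx route) 0 := by
  unfold partition_route
  rw [pvA_first_loop]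
  have hfresh : ∀ a ∈ PySem.List.pyRange 0 (((pvIdx route).length : Int) - 1) 1,
      (PySem.Dict.empty : PySem.Dict Int (List String)).contains a = false := by
    intro a _; rfl
  have hnd : ((PySem.List.pyRange 0 (((pvIdx route).length : Int) - 1) 1).map (fun j => j)).Nodup := by
    simpa using PySem.List.nodup_pyRange_one (a := 0) (b := ((pvIdx route).length : Int) - 1)
  rw [PySem.Dict.items_foldl_insert_fresh
    (PySem.List.pyRange 0 (((pvIdx route).length : Int) - 1) 1)
    (fun j => j)
    (fun j => PySem.List.slice route (some (PySem.List.pyGetD (pvIdx route) j 0))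
      (some (PySem.List.pyGetD (pvIdx route) (j + 1) 0 + 1)))
    PySem.Dict.empty hfresh hnd]
  have hrange : PySem.List.pyRange 0 (((pvIdx route).length : Int) - 1) 1
      = (List.range ((pvIdx route).length - 1)).map (fun (k : Nat) => ((k : Nat) : Int)) := by
    rw [PySem.List.pyRange_one]
    have h2 : (((pvIdx route).length : Int) - 1 - 0).toNat = (pvIdx route).length - 1 := by omega
    rw [h2]
    apply List.map_congr_left
    intro k _; omega
  rw [hrange, List.map_map]
  rw [show ((fun j => (j, PySem.List.slice route (some (PySem.List.pyGetD (pvIdx route) j 0))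
        (some (PySem.List.pyGetD (pvIdx route) (j + 1) 0 + 1)))) ∘ (fun (k : Nat) => ((k : Nat) : Int)))
      = (fun (k : Nat) => (((0 : Int) + (k : Int), PySem.List.slice route (some ((pvIdx route).getD k 0))
        (some ((pvIdx route).getD (k + 1) 0 + 1))) : Int × List String)) from ?_]
  · rw [pvPairs_eq_map]
    simp [show (PySem.Dict.empty : PySem.Dict Int (List String)).items = [] from rfl]
  · funext k
    simp only [Function.comp_apply]
    have h1 : PySem.List.pyGetD (pvIdx route) (k : Int) 0 = (pvIdx route).getD k 0 := by
      rw [PySem.List.pyGetD_natCast]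
    have h2 : PySem.List.pyGetD (pvIdx route) ((k : Int) + 1) 0 = (pvIdx route).getD (k + 1) 0 := by
      rw [show ((k : Int) + 1) = ((k + 1 : Nat) : Int) by push_cast; ring, PySem.List.pyGetD_natCast]
    rw [h1, h2]
    norm_num

-- ===== B-side =====
-- the R-positions of a list, relative Nat indices
def natIdx : List String → List Nat
  | [] => []
  | x :: xs => if x = "R" then 0 :: (natIdx xs).map (· + 1) else (natIdx xs).map (· + 1)

-- slices from consecutive Nat indices
def slicesN (xs : List String) : List Nat → List (List String)
  | a :: b :: t => (xs.drop a).take (b + 1 - a) :: slicesN xs (b :: t)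
  | _ => []

-- slices from consecutive Int indices (PySem form)
def slicesL (xs : List String) : List Int → List (List String)
  | a :: b :: t => PySem.List.slice xs (some a) (some (b + 1)) :: slicesL xs (b :: t)
  | _ => []

theorem natIdx_nil_of_not_mem (xs : List String) (h : "R" ∉ xs) : natIdx xs = [] := by
  induction xs with
  | nil => rfl
  | cons x t ih =>
    have hx : ¬ x = "R" := fun he => h (he ▸ List.mem_cons_self)
    have ht : "R" ∉ t := fun hm => h (List.mem_cons_of_mem _ hm)
    simp [natIdx, hx, ih ht]

theorem natIdx_append (pre ys : List String) (h : "R" ∉ pre) :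
    natIdx (pre ++ ys) = (natIdx ys).map (· + pre.length) := by
  induction pre with
  | nil => simp
  | cons x t ih =>
    have hx : ¬ x = "R" := fun he => h (he ▸ List.mem_cons_self)
    have ht : "R" ∉ t := fun hm => h (List.mem_cons_of_mem _ hm)
    simp only [List.cons_append, natIdx, hx, if_false, ih ht, List.map_map, List.length_cons]
    apply List.map_congr_left
    intro a _
    simp only [Function.comp_apply]
    omega

theorem slicesN_shift (xs : List String) (k : Nat) :
    ∀ L : List Nat, slicesN xs (L.map (· + k)) = slicesN (xs.drop k) L := by
  intro L
  induction L with
  | nil => rfl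
  | cons a t ih =>
    cases t with
    | nil => rfl
    | cons b u =>
      simp only [List.map_cons] at ih ⊢
      simp only [slicesN, List.drop_drop]
      rw [show b + k + 1 - (a + k) = b + 1 - a by omega, show k + a = a + k by omega, ih]

theorem slicesL_natCast (xs : List String) :
    ∀ L : List Nat, slicesL xs (List.map (fun k : Nat => (k : Int)) L) = slicesN xs L := by
  intro L
  induction L with
  | nil => rfl
  | cons a t ih =>
    cases t with
    | nil => rfl
    | cons b u =>
      simp only [List.map_cons] at ih
      simp only [slicesL, slicesN, List.map_cons]
      rw [show ((b : Int) + 1) = ((b + 1 : Nat) : Int) by push_cast; ring,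
        PySem.List.slice_natCast, ih]

theorem pvPairs_eq_enumerate_slicesL (route : List String) :
    ∀ (L : List Int) (j : Int),
      pvPairs route L j = PySem.List.enumerate (slicesL route L) j := by
  intro L
  induction L with
  | nil => intro j; simp [pvPairs, slicesL, PySem.List.enumerate_nil]
  | cons a t ih =>
    intro j
    cases t with
    | nil => simp [pvPairs, slicesL, PySem.List.enumerate_nil]
    | cons b u =>
      simp only [pvPairs, slicesL, PySem.List.enumerate_cons]
      rw [ih (j + 1)]

theorem pvFilter_enumerate_natIdx (xs : List String) :
    ∀ (s : Int),
      (((PySem.List.enumerate xs s).filter (fun q => decide (q.2 = "R"))).map (·.1))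
        = List.map (fun k : Nat => s + (k : Int)) (natIdx xs) := by
  induction xs with
  | nil => intro s; simp only [PySem.List.enumerate_nil, natIdx, List.filter_nil, List.map_nil]
  | cons x t ih =>
    intro s
    rw [PySem.List.enumerate_cons]
    by_cases hx : x = "R"
    · rw [List.filter_cons_of_pos (by simp [hx]), List.map_cons, ih (s + 1)]
      simp only [natIdx, if_pos hx, List.map_cons, List.map_map]
      congr 1
      · norm_num
      · apply List.map_congr_left
        intro a _
        simp only [Function.comp_apply]
        push_cast
        ring
    · rw [List.filter_cons_of_neg (by simp [hx]), ih (s + 1)]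
      simp only [natIdx, if_neg hx, List.map_map]
      apply List.map_congr_left
      intro a _
      simp only [Function.comp_apply]
      push_cast
      ring

theorem pvIdx_natIdx (route : List String) :
    pvIdx route = List.map (fun k : Nat => (k : Int)) (natIdx route) := by
  unfold pvIdx
  rw [pvFilter_enumerate_natIdx route 0]
  apply List.map_congr_left
  intro a _
  omega

-- the loop on a suffix starting at a marker computes exactly the consecutive-index slices of that suffix
theorem segLoop_eq : ∀ (n : Nat) (xs : List String), xs.length ≤ n →
    segLoop ("R" :: xs) = slicesN ("R" :: xs) (natIdx ("R" :: xs)) := by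
  intro n
  induction n with
  | zero =>
    intro xs h
    have hx : xs = [] := List.eq_nil_of_length_eq_zero (Nat.le_zero.mp h)
    subst hx
    simp [segLoop, natIdx, slicesN, PySem.List.index?]
  | succ n ih =>
    intro xs h
    cases hidx : PySem.List.index? xs "R" with
    | none =>
      have hnm : "R" ∉ xs := (PySem.List.index?_eq_none_iff xs "R").mp hidx
      have hidx' : List.idxOf? "R" xs = none := by
        rw [← PySem.List.index?_eq_idxOf?]; exact hidx
      simp [segLoop, hidx', natIdx, natIdx_nil_of_not_mem xs hnm, slicesN]
    | some k0 =>
      obtain ⟨pre, suf, hsplit, hlen, hpre⟩ := (PySem.List.index?_eq_some_iff xs "R" k0).mp hidx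
      -- natIdx ("R" :: xs) = 0 :: (natIdx ("R" :: suf)).map (· + (k0 + 1))
      have hnx : natIdx xs = (natIdx ("R" :: suf)).map (· + k0) := by
        rw [hsplit, natIdx_append pre ("R" :: suf) hpre, hlen]
      have hdrop : ("R" :: xs).drop (k0 + 1) = "R" :: suf := by
        have : xs.drop k0 = "R" :: suf := by
          rw [hsplit, ← hlen, List.drop_left]
        simpa [List.drop_succ_cons] using this
      have hrec : segLoop (("R" :: xs).drop (k0 + 1)) = slicesN ("R" :: suf) (natIdx ("R" :: suf)) := by
        rw [hdrop]
        apply ih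
        have hlen2 : xs.length = pre.length + 1 + suf.length := by
          rw [hsplit]; simp only [List.length_append, List.length_cons]; omega
        omega
      have hgoal_idx : natIdx ("R" :: xs)
          = 0 :: (natIdx ("R" :: suf)).map (· + (k0 + 1)) := by
        have hRxs : natIdx ("R" :: xs) = 0 :: (natIdx xs).map (· + 1) := by simp [natIdx]
        rw [hRxs, hnx, List.map_map]
        congr 1
      have hneRsuf : natIdx ("R" :: suf) = 0 :: (natIdx suf).map (· + 1) := by
        simp [natIdx]
      -- unfold one step of segLoop and of slicesN
      have hidx' : List.idxOf? "R" xs = some k0 := by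
        rw [← PySem.List.index?_eq_idxOf?]; exact hidx
      have hstep : segLoop ("R" :: xs)
          = ("R" :: xs).take (k0 + 2) :: segLoop (("R" :: xs).drop (k0 + 1)) := by
        simp [segLoop, hidx']
      rw [hstep, hrec, hgoal_idx, hneRsuf]
      have hs := slicesN_shift ("R" :: xs) (k0 + 1) (0 :: (natIdx suf).map (· + 1))
      rw [hdrop] at hs
      rw [← hs]
      simp only [List.map_cons, Nat.zero_add, slicesN, List.drop_zero]
      congr 1

theorem pvBsegs_eq (route : List String) :
    (match PySem.List.index? route "R" with
      | some i => segLoop (route.drop i)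
      | none => ([] : List (List String)))
      = slicesN route (natIdx route) := by
  cases hidx : PySem.List.index? route "R" with
  | none =>
    have hnm : "R" ∉ route := (PySem.List.index?_eq_none_iff route "R").mp hidx
    simp [natIdx_nil_of_not_mem route hnm, slicesN]
  | some i =>
    obtain ⟨pre, suf, hsplit, hlen, hpre⟩ := (PySem.List.index?_eq_some_iff route "R" i).mp hidx
    have hdrop : route.drop i = "R" :: suf := by
      rw [hsplit, ← hlen, List.drop_left]
    have hnx : natIdx route = (natIdx ("R" :: suf)).map (· + i) := by
      rw [hsplit, natIdx_append pre ("R" :: suf) hpre, hlen]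
    simp only [hnx]
    rw [slicesN_shift route i (natIdx ("R" :: suf)), hdrop]
    exact (segLoop_eq suf.length suf le_rfl).symm ▸ rfl

theorem pvAlt_eq (route : List String) :
    partition_route_alt route = pvPairs route (pvIdx route) 0 := by
  unfold partition_route_alt
  have hfresh : ∀ p ∈ PySem.List.enumerate
      (match PySem.List.index? route "R" with
        | some i => segLoop (route.drop i)
        | none => ([] : List (List String))) (0 : Int),
      (PySem.Dict.empty : PySem.Dict Int (List String)).contains ((fun (p : Int × List String) => p.1) p) = false := by
    intro p _; rfl
  have hnd : ((PySem.List.enumerate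
      (match PySem.List.index? route "R" with
        | some i => segLoop (route.drop i)
        | none => ([] : List (List String))) (0 : Int)).map (fun p => p.1)).Nodup := by
    rw [PySem.List.map_fst_enumerate]
    exact PySem.List.nodup_pyRange_one _ _
  rw [PySem.Dict.items_foldl_insert_fresh _ (fun (p : Int × List String) => p.1)
    (fun (p : Int × List String) => p.2) PySem.Dict.empty hfresh hnd]
  rw [show (PySem.Dict.empty : PySem.Dict Int (List String)).items = [] from rfl, List.nil_append]
  simp only [Prod.mk.eta, List.map_id']
  rw [pvBsegs_eq route]
  rw [pvPairs_eq_enumerate_slicesL route (pvIdx route) 0, pvIdx_natIdx route,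
    slicesL_natCast route (natIdx route)]

-- ===== VERDICT (by name: the statement is the Claim_ definition above) =====
theorem partition_route_spec : Claim_equal_partition_route := by
  intro route _
  unfold Spec_partition_route
  rw [pvA_eq, pvAlt_eq]
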